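-- pv_equiv track=rewrite | github.com/Stahash/AdventOfCode2020 | src/day_19.py | check_main_rule
-- ===== SOURCE A (Python) =====
-- def check_main_rule(main_rule):
--
--     consists_of_letters = True
--     for sub_rule in main_rule:
--         elements = sub_rule.split(' ')
--         if set(elements) not in [{'a', 'b'}, {'a'}, {'b'}]:
--             consists_of_letters = False
--             return consists_of_letters
--
--     return consists_of_letters
-- ===== SOURCE B (Python) =====
-- def check_main_rule(main_rule):
--     return all(
--         token in ('a', 'b')
--         for sub_rule in main_rule
--         for token in sub_rule.split(' ')
--     )
-- ===== Notes on version B (the rewrite author's own statement) =====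
-- stated objective: idiomatic
-- what changed: B drops A's early-return flag and set-equality test against the three admissible sets, instead checking directly with a flat all() that every space-separated token of every sub-rule is 'a' or 'b'.
import Mathlib
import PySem

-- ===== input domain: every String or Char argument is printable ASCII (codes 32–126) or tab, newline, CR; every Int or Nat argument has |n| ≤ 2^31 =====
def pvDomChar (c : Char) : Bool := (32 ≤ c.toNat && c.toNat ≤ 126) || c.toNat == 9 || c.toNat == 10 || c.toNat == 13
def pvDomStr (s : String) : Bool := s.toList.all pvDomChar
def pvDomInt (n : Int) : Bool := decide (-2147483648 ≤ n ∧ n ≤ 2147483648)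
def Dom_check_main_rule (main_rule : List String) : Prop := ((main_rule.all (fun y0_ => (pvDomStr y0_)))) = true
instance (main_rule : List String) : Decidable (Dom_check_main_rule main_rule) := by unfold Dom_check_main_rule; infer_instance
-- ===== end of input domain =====

-- B replaces A's early-return flag and set-equality test by a flat all() over the split tokens (idiomatic; same cost).

-- ===== PORT A =====
-- the 'for sub_rule in main_rule' loop with the early return
def checkA_loop : List String → Bool
  | [] => true
  | sub_rule :: rest =>
    let elements := (PySem.Str.split? sub_rule " ").getD []   -- sub_rule.split(' '); sep ≠ '' so split? is always some
    if !(PySem.Set.equal (PySem.Set.ofList elements) (PySem.Set.ofList ["a", "b"])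
         || PySem.Set.equal (PySem.Set.ofList elements) (PySem.Set.ofList ["a"])
         || PySem.Set.equal (PySem.Set.ofList elements) (PySem.Set.ofList ["b"])) then
      false                                                   -- consists_of_letters = False; return it
    else
      checkA_loop rest

def check_main_rule (main_rule : List String) : Bool := checkA_loop main_rule

-- ===== PORT B =====
def check_main_rule_alt (main_rule : List String) : Bool :=
  main_rule.all (fun sub_rule =>
    ((PySem.Str.split? sub_rule " ").getD []).all (fun token => token == "a" || token == "b"))

-- ===== PRECONDITION & SPEC =====
def Spec_check_main_rule (main_rule : List String) (out : Bool) : Prop := out = check_main_rule_alt main_rule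
instance (main_rule : List String) (out : Bool) : Decidable (Spec_check_main_rule main_rule out) := by unfold Spec_check_main_rule; infer_instance

-- ===== CLAIM (what is proved, stated in full; the proofs are below) =====
def Claim_equal_check_main_rule : Prop := ∀ (main_rule : List String), Dom_check_main_rule main_rule → Spec_check_main_rule main_rule (check_main_rule main_rule)

-- ===== LEMMAS AND PROOFS =====

-- splitOn's worker never returns the empty list (both base cases cons onto acc)
theorem splitOn_go_ne_nil (sep : List Char) (fuel : Nat) (l cur : List Char)
    (acc : List (List Char)) : PySem.Chars.splitOn.go sep fuel l cur acc ≠ [] := by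
  induction fuel generalizing l cur acc with
  | zero => simp [PySem.Chars.splitOn.go]
  | succ n ih =>
    cases l with
    | nil => simp [PySem.Chars.splitOn.go]
    | cons c rest =>
      rw [PySem.Chars.splitOn.go]
      split_ifs with h
      · exact ih _ _ _
      · exact ih _ _ _

theorem split_space_ne_nil (s : String) :
    (PySem.Str.split? s " ").getD [] ≠ [] := by
  simp only [PySem.Str.split?, PySem.Chars.split?]
  have h := splitOn_go_ne_nil [' '] (s.toList.length + 1) s.toList [] []
  cases heq : PySem.Chars.splitOn s.toList [' '] with
  | nil => exact absurd (by simpa [PySem.Chars.splitOn] using heq) h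
  | cons t ts => simp [heq]

-- the per-sub-rule condition: for a nonempty token list, membership of its set
-- in [{'a','b'}, {'a'}, {'b'}] is exactly "every token is 'a' or 'b'"
theorem set_cond_eq_all (elements : List String) (hne : elements ≠ []) :
    (PySem.Set.equal (PySem.Set.ofList elements) (PySem.Set.ofList ["a", "b"])
      || PySem.Set.equal (PySem.Set.ofList elements) (PySem.Set.ofList ["a"])
      || PySem.Set.equal (PySem.Set.ofList elements) (PySem.Set.ofList ["b"]))
    = elements.all (fun token => token == "a" || token == "b") := by
  by_cases hall : ∀ t ∈ elements, t = "a" ∨ t = "b"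
  · have hr : elements.all (fun token => token == "a" || token == "b") = true := by
      simp only [List.all_eq_true]
      intro t ht
      rcases hall t ht with h | h <;> simp [h]
    rw [hr]
    by_cases ha : "a" ∈ elements <;> by_cases hb : "b" ∈ elements
    · have : PySem.Set.equal (PySem.Set.ofList elements) (PySem.Set.ofList ["a", "b"]) = true := by
        rw [PySem.Set.equal_iff]
        intro x
        simp only [PySem.Set.mem_ofList]
        constructor
        · intro hx; rcases hall x hx with h | h <;> simp [h]
        · intro hx
          rcases List.mem_cons.mp hx with h | h
          · exact h ▸ ha
          · simp only [List.mem_singleton] at h; exact h ▸ hb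
      simp [this]
    · have : PySem.Set.equal (PySem.Set.ofList elements) (PySem.Set.ofList ["a"]) = true := by
        rw [PySem.Set.equal_iff]
        intro x
        simp only [PySem.Set.mem_ofList, List.mem_singleton]
        constructor
        · intro hx
          rcases hall x hx with h | h
          · exact h
          · exact absurd (h ▸ hx) hb
        · intro hx; exact hx ▸ ha
      simp [this]
    · have : PySem.Set.equal (PySem.Set.ofList elements) (PySem.Set.ofList ["b"]) = true := by
        rw [PySem.Set.equal_iff]
        intro x
        simp only [PySem.Set.mem_ofList, List.mem_singleton]
        constructor
        · intro hx
          rcases hall x hx with h | h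
          · exact absurd (h ▸ hx) ha
          · exact h
        · intro hx; exact hx ▸ hb
      simp [this]
    · rcases List.exists_mem_of_ne_nil elements hne with ⟨t, ht⟩
      rcases hall t ht with h | h
      · exact absurd (h ▸ ht) ha
      · exact absurd (h ▸ ht) hb
  · push Not at hall
    rcases hall with ⟨t, ht, hta, htb⟩
    have hr : elements.all (fun token => token == "a" || token == "b") = false := by
      simp only [List.all_eq_false]
      exact ⟨t, ht, by simp [hta, htb]⟩
    rw [hr]
    have key : ∀ (ys : List String), (∀ y ∈ ys, y = "a" ∨ y = "b") →
        PySem.Set.equal (PySem.Set.ofList elements) (PySem.Set.ofList ys) = false := by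
      intro ys hys
      rw [Bool.eq_false_iff]
      intro hcontra
      rw [PySem.Set.equal_iff] at hcontra
      have := (hcontra t).mp (by simp only [PySem.Set.mem_ofList]; exact ht)
      simp only [PySem.Set.mem_ofList] at this
      rcases hys t this with h | h
      · exact hta h
      · exact htb h
    rw [key ["a", "b"] (by intro y hy; rcases List.mem_cons.mp hy with h | h; exacts [Or.inl h, Or.inr (by simpa using h)]),
        key ["a"] (by intro y hy; left; simpa using hy),
        key ["b"] (by intro y hy; right; simpa using hy)]
    rfl

theorem loop_eq_all (main_rule : List String) :
    checkA_loop main_rule = check_main_rule_alt main_rule := by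
  induction main_rule with
  | nil => rfl
  | cons sub rest ih =>
    simp only [checkA_loop, check_main_rule_alt, List.all_cons]
    rw [set_cond_eq_all _ (split_space_ne_nil sub)]
    cases h : ((PySem.Str.split? sub " ").getD []).all (fun token => token == "a" || token == "b") with
    | false => simp
    | true => simpa [check_main_rule_alt] using ih

-- ===== VERDICT (by name: the statement is the Claim_ definition above) =====
theorem check_main_rule_spec : Claim_equal_check_main_rule := by
  intro main_rule _
  unfold Spec_check_main_rule check_main_rule
  exact loop_eq_all main_rule
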